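-- pv_equiv track=rewrite | github.com/Jotham566/predictive_maintenance_compressor | dashboard.py | format_day_range_label
-- ===== SOURCE A (Python) =====
-- from typing import List, Tuple, Union
--
-- def format_day_range_label(selected_days: List[int]) -> str:
--     """Formats a list of selected days into a concise label for titles."""
--     if not selected_days:
--         return ""
--     if len(selected_days) == 1:
--         return f"Day {selected_days[0]}"
--
--     selected_days.sort()
--     is_consecutive = True
--     for i in range(1, len(selected_days)):
--         if selected_days[i] != selected_days[i - 1] + 1:
--             is_consecutive = False
--             break
--
--     if is_consecutive:
--         return f"Days {selected_days[0]}-{selected_days[-1]}"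
--     else:
--         return f"Days {', '.join(map(str, selected_days))}"
-- ===== SOURCE B (Python) =====
-- def format_day_range_label(selected_days):
--     """Formats a list of selected days into a concise label for titles."""
--     if not selected_days:
--         return ""
--     if len(selected_days) == 1:
--         return f"Day {selected_days[0]}"
--     selected_days.sort()
--     is_consecutive = (len(set(selected_days)) == len(selected_days)
--                       and selected_days[-1] - selected_days[0] == len(selected_days) - 1)
--     if is_consecutive:
--         return f"Days {selected_days[0]}-{selected_days[-1]}"
--     return f"Days {', '.join(map(str, selected_days))}"
-- ===== Notes on version B (the rewrite author's own statement) =====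
-- stated objective: simpler
-- what changed: Replaces the adjacent-difference scan loop with a closed-form consecutiveness test: the sorted list is consecutive iff its elements are distinct and last - first == len - 1.
import Mathlib
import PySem

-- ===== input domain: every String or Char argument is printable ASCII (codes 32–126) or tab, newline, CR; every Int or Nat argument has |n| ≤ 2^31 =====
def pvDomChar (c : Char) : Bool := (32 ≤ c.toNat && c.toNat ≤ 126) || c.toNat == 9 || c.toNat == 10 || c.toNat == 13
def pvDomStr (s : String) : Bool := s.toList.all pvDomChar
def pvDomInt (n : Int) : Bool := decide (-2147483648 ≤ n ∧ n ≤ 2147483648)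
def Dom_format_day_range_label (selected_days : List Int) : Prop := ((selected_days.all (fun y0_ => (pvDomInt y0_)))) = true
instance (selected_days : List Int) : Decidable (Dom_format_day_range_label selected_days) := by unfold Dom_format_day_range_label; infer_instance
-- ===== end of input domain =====

-- B replaces A's adjacent-difference scan loop with a closed-form test (distinct elements ∧ last - first = len - 1); simpler, same cost.
-- Both A and B sort the Python argument in place; the equivalence proved here is about the RETURN value (the mutation is identical anyway).

-- ===== PORT A =====
-- A's 'for i in range(1, len)' loop with break, as the obvious scan over adjacent pairs
def pvScan : Int → List Int → Bool
  | _, [] => true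
  | prev, x :: t => if x ≠ prev + 1 then false else pvScan x t

def format_day_range_label (selected_days : List Int) : String :=
  if selected_days = [] then ""
  else if selected_days.length = 1 then
    "Day " ++ PySem.Int.toStr (PySem.List.pyGetD selected_days 0 0)
  else
    let s := PySem.List.sorted selected_days (fun x => x) false
    let is_consecutive := match s with
      | [] => true
      | h :: t => pvScan h t
    if is_consecutive then
      "Days " ++ PySem.Int.toStr (PySem.List.pyGetD s 0 0) ++ "-" ++
        PySem.Int.toStr (PySem.List.pyGetD s (-1) 0)
    else
      "Days " ++ PySem.Str.join ", " (s.map PySem.Int.toStr)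

-- ===== PORT B =====
def format_day_range_label_alt (selected_days : List Int) : String :=
  if selected_days = [] then ""
  else if selected_days.length = 1 then
    "Day " ++ PySem.Int.toStr (PySem.List.pyGetD selected_days 0 0)
  else
    let s := PySem.List.sorted selected_days (fun x => x) false
    let is_consecutive :=
      ((PySem.Set.ofList s).length == s.length) &&
        (PySem.List.pyGetD s (-1) 0 - PySem.List.pyGetD s 0 0 == (s.length : Int) - 1)
    if is_consecutive then
      "Days " ++ PySem.Int.toStr (PySem.List.pyGetD s 0 0) ++ "-" ++
        PySem.Int.toStr (PySem.List.pyGetD s (-1) 0)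
    else
      "Days " ++ PySem.Str.join ", " (s.map PySem.Int.toStr)

-- ===== PRECONDITION & SPEC =====
def Spec_format_day_range_label (selected_days : List Int) (out : String) : Prop := out = format_day_range_label_alt selected_days
instance (selected_days : List Int) (out : String) : Decidable (Spec_format_day_range_label selected_days out) := by unfold Spec_format_day_range_label; infer_instance

-- ===== CLAIM (what is proved, stated in full; the proofs are below) =====
def Claim_equal_format_day_range_label : Prop := ∀ (selected_days : List Int), Dom_format_day_range_label selected_days → Spec_format_day_range_label selected_days (format_day_range_label selected_days)

-- ===== LEMMAS AND PROOFS =====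

-- len(set(xs)) == len(xs) is exactly distinctness
lemma pv_filter_lt (p : Int → Bool) (l : List Int) (x : Int) (hx : x ∈ l)
    (hp : p x = false) : (l.filter p).length < l.length := by
  induction l with
  | nil => cases hx
  | cons a l ih =>
    rcases List.mem_cons.mp hx with rfl | hxl
    · have hle := List.length_filter_le p l
      rw [List.filter_cons, if_neg (by simp [hp])]
      simp only [List.length_cons]
      omega
    · have hlt := ih hxl
      by_cases hpa : p a = true
      · rw [List.filter_cons, if_pos hpa]
        simp only [List.length_cons]
        omega
      · rw [List.filter_cons, if_neg hpa]
        simp only [List.length_cons]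
        omega

lemma pv_ofList_len_iff (xs : List Int) :
    (PySem.Set.ofList xs).length = xs.length ↔ xs.Nodup := by
  induction xs with
  | nil => simp [PySem.Set.ofList, PySem.Set.empty]
  | cons x xs ih =>
    rw [PySem.Set.ofList_cons]
    by_cases hx : x ∈ xs
    · have hxo : x ∈ PySem.Set.ofList xs := (PySem.Set.mem_ofList xs x).mpr hx
      have hlt : ((PySem.Set.ofList xs).discard x).length < (PySem.Set.ofList xs).length := by
        unfold PySem.Set.discard
        exact pv_filter_lt _ _ x hxo (by simp)
      have hle := PySem.Set.length_ofList_le (xs := xs)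
      constructor
      · intro h; simp only [List.length_cons] at h; omega
      · intro h; exact absurd h (by simp [hx])
    · have hxo : x ∉ PySem.Set.ofList xs := fun h => hx ((PySem.Set.mem_ofList xs x).mp h)
      have hd : (PySem.Set.ofList xs).discard x = PySem.Set.ofList xs := by
        unfold PySem.Set.discard
        apply List.filter_eq_self.mpr
        intro y hy
        have hyx : ¬ y == x := fun hb => hxo (eq_of_beq hb ▸ hy)
        simp [hyx]
      rw [hd]
      simp only [List.length_cons, List.nodup_cons]
      constructor
      · intro hlen
        exact ⟨hx, ih.mp (by omega)⟩
      · rintro ⟨-, hnd⟩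
        rw [ih.mpr hnd]

-- Pairwise ≤ together with Nodup is Pairwise <
lemma pv_pairwise_lt (l : List Int) (hp : l.Pairwise (· ≤ ·)) (hnd : l.Nodup) :
    l.Pairwise (· < ·) :=
  (hp.and hnd).imp (fun h => lt_of_le_of_ne h.1 h.2)

-- a strictly increasing integer list spans at least its length
lemma pv_last_ge (t : List Int) : ∀ (y : Int), (y :: t).Pairwise (· < ·) →
    y + t.length ≤ (y :: t).getLast (List.cons_ne_nil y t) := by
  induction t with
  | nil => intro y _; simp
  | cons z t' ih =>
    intro y hp
    have hyz : y < z := (List.pairwise_cons.mp hp).1 z (by simp)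
    have := ih z (List.pairwise_cons.mp hp).2
    rw [List.getLast_cons (List.cons_ne_nil z t')]
    simp only [List.length_cons]
    push_cast
    omega

-- closed-form characterisation of A's scan on a sorted list
lemma pv_scan_iff (t : List Int) : ∀ (h : Int), (h :: t).Pairwise (· ≤ ·) →
    (pvScan h t = true ↔
      ((h :: t).Nodup ∧ (h :: t).getLast (List.cons_ne_nil h t) = h + t.length)) := by
  induction t with
  | nil => intro h _; simp [pvScan]
  | cons x t' ih =>
    intro h hp
    have hhx : h ≤ x := (List.pairwise_cons.mp hp).1 x (by simp)
    have hp' : (x :: t').Pairwise (· ≤ ·) := (List.pairwise_cons.mp hp).2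
    rw [List.getLast_cons (List.cons_ne_nil x t')]
    by_cases hx1 : x = h + 1
    · subst hx1
      have hnotmem : h ∉ (h + 1) :: t' := by
        intro hm
        rcases List.mem_cons.mp hm with h1 | h2
        · omega
        · have := (List.pairwise_cons.mp hp').1 h h2; omega
      have hstep : pvScan h ((h + 1) :: t') = pvScan (h + 1) t' := by
        simp only [pvScan]
        rw [if_neg (by simp)]
      rw [hstep, ih (h + 1) hp']
      constructor
      · rintro ⟨hnd, hlast⟩
        refine ⟨List.nodup_cons.mpr ⟨hnotmem, hnd⟩, ?_⟩
        rw [hlast]; simp only [List.length_cons]; push_cast; ring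
      · rintro ⟨hnd, hlast⟩
        refine ⟨(List.nodup_cons.mp hnd).2, ?_⟩
        rw [hlast]; simp only [List.length_cons]; push_cast; ring
    · have hscan : pvScan h (x :: t') = false := by
        simp only [pvScan]
        rw [if_pos hx1]
      rw [hscan]
      simp only [Bool.false_eq_true, false_iff]
      rintro ⟨hnd, hlast⟩
      by_cases heq : x = h
      · exact (List.nodup_cons.mp hnd).1 (heq ▸ List.mem_cons_self)
      · have hx2 : h + 2 ≤ x := by omega
        have hlt : (h :: x :: t').Pairwise (· < ·) := pv_pairwise_lt _ hp hnd
        have hge := pv_last_ge t' x (List.pairwise_cons.mp hlt).2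
        simp only [List.length_cons] at hlast
        push_cast at hlast
        omega

-- ===== VERDICT (by name: the statement is the Claim_ definition above) =====
theorem format_day_range_label_spec : Claim_equal_format_day_range_label := by
  intro sd _
  unfold Spec_format_day_range_label format_day_range_label format_day_range_label_alt
  by_cases h0 : sd = []
  · simp [h0]
  · by_cases h1 : sd.length = 1
    · simp [h0, h1]
    · simp only [h0, h1, if_false]
      have hne : PySem.List.sorted sd (fun x => x) false ≠ [] := by
        simpa [PySem.List.sorted_eq_nil_iff] using h0
      obtain ⟨h, t, hs⟩ := List.exists_cons_of_ne_nil hne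
      have hp : (h :: t).Pairwise (· ≤ ·) := by
        have := PySem.List.sorted_pairwise (xs := sd) (key := fun x => x)
        rw [hs] at this
        exact this
      rw [hs]
      have hmatch : (match h :: t with
          | [] => true
          | h :: t => pvScan h t) = pvScan h t := rfl
      have hcond : pvScan h t =
          (((PySem.Set.ofList (h :: t)).length == (h :: t).length) &&
            (PySem.List.pyGetD (h :: t) (-1) 0 - PySem.List.pyGetD (h :: t) 0 0 ==
              ((h :: t).length : Int) - 1)) := by
        rw [PySem.List.pyGetD_neg_one (h :: t) 0 (List.cons_ne_nil h t),
          PySem.List.pyGetD_zero_cons, Bool.eq_iff_iff]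
        simp only [Bool.and_eq_true, beq_iff_eq, pv_ofList_len_iff]
        rw [pv_scan_iff t h hp]
        constructor
        · rintro ⟨hnd, hlast⟩
          refine ⟨hnd, ?_⟩
          rw [hlast]; simp only [List.length_cons]; push_cast; ring
        · rintro ⟨hnd, hlast⟩
          refine ⟨hnd, ?_⟩
          simp only [List.length_cons] at hlast
          push_cast at hlast
          omega
      rw [hmatch, hcond]
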